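-- pv_equiv track=rewrite | github.com/Hunterdii/GeeksforGeeks-POTD | January 2026 GFG SOLUTION/January-23.py | maxPeople
-- ===== SOURCE A (Python) =====
-- def maxPeople(arr):
--     n = len(arr)
--     l, r, s = [1] * n, [1] * n, []
--     for i in range(n):
--         while s and arr[s[-1]] < arr[i]: l[i] += l[s.pop()]
--         s.append(i)
--     s.clear()
--     for i in range(n - 1, -1, -1):
--         while s and arr[s[-1]] < arr[i]: r[i] += r[s.pop()]
--         s.append(i)
--     return max(l[i] + r[i] - 1 for i in range(n))
-- ===== SOURCE B (Python) =====
-- def maxPeople(arr):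
--     n = len(arr)
--     best = 0
--     for i in range(n):
--         left = 1
--         j = i - 1
--         while j >= 0 and arr[j] < arr[i]:
--             left += 1
--             j -= 1
--         right = 1
--         j = i + 1
--         while j < n and arr[j] < arr[i]:
--             right += 1
--             j += 1
--         cand = left + right - 1
--         if cand > best:
--             best = cand
--     return best
-- ===== Notes on version B (the rewrite author's own statement) =====
-- stated objective: simpler
-- what changed: B replaces A's two monotonic-stack passes plus per-index l/r arrays and a final max() by a single loop that, for each index, directly counts the consecutive strictly-smaller neighbours to the left and to the right and keeps a running maximum.
import Mathlib
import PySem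

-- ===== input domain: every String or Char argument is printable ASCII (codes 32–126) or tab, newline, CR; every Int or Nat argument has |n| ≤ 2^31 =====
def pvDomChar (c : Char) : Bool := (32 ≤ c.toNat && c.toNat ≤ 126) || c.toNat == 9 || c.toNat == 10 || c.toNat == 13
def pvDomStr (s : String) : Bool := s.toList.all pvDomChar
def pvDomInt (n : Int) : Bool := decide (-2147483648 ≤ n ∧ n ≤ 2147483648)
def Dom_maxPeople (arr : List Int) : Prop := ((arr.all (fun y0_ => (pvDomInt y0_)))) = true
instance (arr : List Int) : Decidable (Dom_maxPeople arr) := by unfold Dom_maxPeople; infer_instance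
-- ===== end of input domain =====

-- B replaces A's monotonic-stack accumulation by a direct per-index count of consecutive
-- strictly-smaller neighbours on each side with a running maximum (simpler, not faster).

-- ===== PORT A =====
-- list indexing arr[i] (indices here are always in range, so getD is exact)
def pg (xs : List Int) (i : Nat) : Int := xs.getD i 0

-- the inner 'while s and arr[s[-1]] < arr[i]: l[i] += l[s.pop()]' loop of A,
-- mutating the array at index i exactly as Python does
def popA (arr : List Int) (pivot : Int) (i : Nat) : List Int → List Nat → List Int × List Nat
  | l, [] => (l, [])
  | l, t :: rest =>
    if pg arr t < pivot then popA arr pivot i (l.set i (pg l i + pg l t)) rest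
    else (l, t :: rest)

-- one iteration of A's for-loop body (pop loop, then s.append(i))
def stepA (arr : List Int) (st : List Int × List Nat) (i : Nat) : List Int × List Nat :=
  let p := popA arr (pg arr i) i st.1 st.2
  (p.1, i :: p.2)

-- range(n) → List.range n; range(n-1,-1,-1) → (List.range n).reverse (exact for these bounds)
def maxPeople (arr : List Int) : Int :=
  let n := arr.length
  let fw := (List.range n).foldl (stepA arr) (List.replicate n (1 : Int), ([] : List Nat))
  let bw := ((List.range n).reverse).foldl (stepA arr) (List.replicate n (1 : Int), ([] : List Nat))
  match PySem.List.max? ((List.range n).map (fun i => pg fw.1 i + pg bw.1 i - 1)) (fun y => y) with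
  | some v => v
  | none => 0

-- ===== PORT B =====
-- B's left while-loop: 'j = i-1; while j >= 0 and arr[j] < arr[i]: left += 1; j -= 1'
-- the Nat argument k encodes j = k - 1 (k = 0 means j = -1, the loop stops)
def lwalk (arr : List Int) (pivot : Int) : Int → Nat → Int
  | left, 0 => left
  | left, k + 1 => if pg arr k < pivot then lwalk arr pivot (left + 1) k else left

-- B's right while-loop: 'j = i+1; while j < n and arr[j] < arr[i]: right += 1; j += 1'
def rwalk (arr : List Int) (n : Nat) (pivot : Int) (right : Int) (j : Nat) : Int :=
  if _h : j < n then
    (if pg arr j < pivot then rwalk arr n pivot (right + 1) (j + 1) else right)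
  else right
termination_by n - j

def maxPeople_alt (arr : List Int) : Int :=
  let n := arr.length
  (List.range n).foldl (fun best i =>
    let left := lwalk arr (pg arr i) 1 i
    let right := rwalk arr n (pg arr i) 1 (i + 1)
    let cand := left + right - 1
    if cand > best then cand else best) 0

-- ===== PRECONDITION & SPEC =====
-- Pre_ excludes exactly the empty list, on which A's max() raises ValueError.
def Pre_maxPeople (arr : List Int) : Prop := arr ≠ []
instance (arr : List Int) : Decidable (Pre_maxPeople arr) := by unfold Pre_maxPeople; infer_instance
def pvWitness_maxPeople : List Int := [2, 1, 3]

def Spec_maxPeople (arr : List Int) (out : Int) : Prop := out = maxPeople_alt arr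
instance (arr : List Int) (out : Int) : Decidable (Spec_maxPeople arr out) := by unfold Spec_maxPeople; infer_instance

-- ===== CLAIM (what is proved, stated in full; the proofs are below) =====
def Claim_equal_maxPeople : Prop := ∀ (arr : List Int), Dom_maxPeople arr → Pre_maxPeople arr → Spec_maxPeople arr (maxPeople arr)

-- ===== LEMMAS AND PROOFS =====

-- B's per-index answers
def Lv (arr : List Int) (i : Nat) : Int := lwalk arr (pg arr i) 1 i
def Rv (arr : List Int) (i : Nat) : Int := rwalk arr arr.length (pg arr i) 1 (i + 1)

-- basic getD/set facts
lemma pg_set_self (l : List Int) (i : Nat) (v : Int) (h : i < l.length) :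
    pg (l.set i v) i = v := by
  simp [pg, List.getD, h]

lemma pg_set_ne (l : List Int) (i j : Nat) (v : Int) (h : j ≠ i) :
    pg (l.set i v) j = pg l j := by
  simp [pg, List.getD, List.getElem?_set_ne (by omega : i ≠ j)]

lemma pg_replicate (n i : Nat) (h : i < n) :
    pg (List.replicate n (1 : Int)) i = 1 := by
  simp [pg, List.getD, h]

-- lwalk characterisations
lemma lwalk_all (arr : List Int) (p : Int) :
    ∀ (j : Nat) (acc : Int), (∀ m, m < j → pg arr m < p) → lwalk arr p acc j = acc + j := by
  intro j
  induction j with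
  | zero => intro acc _; simp [lwalk]
  | succ k ih =>
    intro acc h
    have hk : pg arr k < p := h k (by omega)
    simp only [lwalk, if_pos hk]
    rw [ih (acc + 1) (fun m hm => h m (by omega))]
    push_cast; ring

lemma lwalk_stop (arr : List Int) (p : Int) :
    ∀ (j t : Nat) (acc : Int), t < j → (∀ m, t < m → m < j → pg arr m < p) →
      ¬ pg arr t < p → lwalk arr p acc j = acc + ((j : Int) - t - 1) := by
  intro j
  induction j with
  | zero => intro t acc h; omega
  | succ k ih =>
    intro t acc ht hgap hstop
    by_cases hkt : t = k
    · subst hkt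
      simp only [lwalk, if_neg hstop]
      push_cast; ring
    · have hk : pg arr k < p := hgap k (by omega) (by omega)
      simp only [lwalk, if_pos hk]
      rw [ih t (acc + 1) (by omega) (fun m hm hm2 => hgap m hm (by omega)) hstop]
      push_cast; ring

-- rwalk characterisations
lemma rwalk_all (arr : List Int) (n : Nat) (p : Int) (j : Nat) (acc : Int)
    (hj : j ≤ n) (h : ∀ m, j ≤ m → m < n → pg arr m < p) :
    rwalk arr n p acc j = acc + ((n : Int) - j) := by
  by_cases hlt : j < n
  · have hp : pg arr j < p := h j le_rfl hlt
    rw [rwalk]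
    simp only [dif_pos hlt, if_pos hp]
    rw [rwalk_all arr n p (j + 1) (acc + 1) (by omega) (fun m hm hm2 => h m (by omega) hm2)]
    push_cast; ring
  · have hjn : j = n := by omega
    rw [rwalk]
    simp only [dif_neg hlt]
    rw [hjn]
    ring
termination_by n - j

lemma rwalk_stop (arr : List Int) (n : Nat) (p : Int) (j t : Nat) (acc : Int)
    (hjt : j ≤ t) (htn : t < n) (hgap : ∀ m, j ≤ m → m < t → pg arr m < p)
    (hstop : ¬ pg arr t < p) : rwalk arr n p acc j = acc + ((t : Int) - j) := by
  by_cases hjeq : j = t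
  · subst hjeq
    rw [rwalk]
    simp only [dif_pos htn, if_neg hstop]
    ring_nf
  · have hj : j < n := by omega
    have hp : pg arr j < p := hgap j le_rfl (by omega)
    rw [rwalk]
    simp only [dif_pos hj, if_pos hp]
    rw [rwalk_stop arr n p (j + 1) t (acc + 1) (by omega) htn
      (fun m hm hm2 => hgap m (by omega) hm2) hstop]
    push_cast; ring
termination_by t - j

lemma rwalk_ge (arr : List Int) (n : Nat) (p : Int) (j : Nat) (acc : Int) :
    acc ≤ rwalk arr n p acc j := by
  rw [rwalk]
  by_cases hlt : j < n
  · simp only [dif_pos hlt]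
    by_cases hp : pg arr j < p
    · simp only [if_pos hp]
      have := rwalk_ge arr n p (j + 1) (acc + 1)
      omega
    · simp [if_neg hp]
  · simp [dif_neg hlt]
termination_by n - j

-- ===== forward pass invariant =====

-- the stack below its (given) top element t, for the forward pass
def FBelow (arr : List Int) (l : List Int) : Nat → List Nat → Prop
  | t, [] => pg l t = (t : Int) + 1 ∧ ∀ m, m < t → pg arr m < pg arr t
  | t, u :: rest => u < t ∧ pg arr t ≤ pg arr u ∧ (∀ m, u < m → m < t → pg arr m < pg arr t) ∧
      pg l t = (t : Int) - u ∧ FBelow arr l u rest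

-- state of the pop loop while processing index i (forward)
def HF (arr : List Int) (i : Nat) (l : List Int) : List Nat → Prop
  | [] => pg l i = (i : Int) + 1 ∧ ∀ m, m < i → pg arr m < pg arr i
  | t :: rest => t < i ∧ pg l i = (i : Int) - t ∧ (∀ m, t < m → m < i → pg arr m < pg arr i) ∧
      FBelow arr l t rest

lemma FBelow_congr (arr : List Int) :
    ∀ (s : List Nat) (t : Nat) (l l' : List Int),
      (∀ j, j ≤ t → pg l' j = pg l j) → FBelow arr l t s → FBelow arr l' t s := by
  intro s
  induction s with
  | nil => intro t l l' hag h; exact ⟨(hag t le_rfl).trans h.1, h.2⟩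
  | cons u rest ih =>
    intro t l l' hag h
    rcases h with ⟨hut, harr, hgap, hl, hb⟩
    exact ⟨hut, harr, hgap, (hag t le_rfl).trans hl,
      ih u l l' (fun j hj => hag j (by omega)) hb⟩

lemma popA_fwd (arr : List Int) (i : Nat) (hi : i < arr.length) :
    ∀ (s : List Nat) (l : List Int), l.length = arr.length → HF arr i l s →
      (popA arr (pg arr i) i l s).1.length = arr.length ∧
      HF arr i (popA arr (pg arr i) i l s).1 (popA arr (pg arr i) i l s).2 ∧
      (∀ j, j ≠ i → pg (popA arr (pg arr i) i l s).1 j = pg l j) ∧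
      (match (popA arr (pg arr i) i l s).2 with
       | [] => True
       | t :: _ => pg arr i ≤ pg arr t) := by
  intro s
  induction s with
  | nil =>
    intro l hlen h
    exact ⟨hlen, h, fun j _ => rfl, trivial⟩
  | cons t rest ih =>
    intro l hlen h
    rcases h with ⟨hti, hli, hgap, hb⟩
    by_cases hc : pg arr t < pg arr i
    · -- pop t
      simp only [popA, if_pos hc]
      set l₂ := l.set i (pg l i + pg l t) with hl₂
      have hlen₂ : l₂.length = arr.length := by simp [hl₂, hlen]
      have hpg₂i : pg l₂ i = pg l i + pg l t := pg_set_self l i _ (by omega)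
      have hpg₂ne : ∀ j, j ≠ i → pg l₂ j = pg l j := fun j hj => pg_set_ne l i j _ hj
      have h₂ : HF arr i l₂ rest := by
        cases rest with
        | nil =>
          rcases hb with ⟨hlt, hbelow⟩
          refine ⟨?_, ?_⟩
          · rw [hpg₂i, hli, hlt]; ring
          · intro m hm
            rcases lt_trichotomy m t with h1 | h1 | h1
            · exact lt_trans (hbelow m h1) hc
            · subst h1; exact hc
            · exact hgap m h1 hm
        | cons u rest' =>
          rcases hb with ⟨hut, harr, hgap', hlt, hb'⟩
          refine ⟨by omega, ?_, ?_, ?_⟩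
          · rw [hpg₂i, hli, hlt]; ring
          · intro m hm1 hm2
            rcases lt_trichotomy m t with h1 | h1 | h1
            · exact lt_trans (hgap' m hm1 h1) hc
            · subst h1; exact hc
            · exact hgap m h1 hm2
          · exact FBelow_congr arr rest' u l l₂
              (fun j hj => hpg₂ne j (by omega)) hb'
      have := ih l₂ hlen₂ h₂
      refine ⟨this.1, this.2.1, ?_, this.2.2.2⟩
      intro j hj
      rw [this.2.2.1 j hj, hpg₂ne j hj]
    · -- stop
      simp only [popA, if_neg hc]
      refine ⟨hlen, ?_, fun j _ => trivial, by omega⟩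
      exact ⟨hti, hli, hgap, hb⟩

-- forward loop invariant: indices < i are done, stack top is i-1
def FSt (arr : List Int) (st : List Int × List Nat) (i : Nat) : Prop :=
  st.1.length = arr.length ∧
  (∀ j, j < i → pg st.1 j = Lv arr j) ∧
  (∀ j, i ≤ j → j < arr.length → pg st.1 j = 1) ∧
  (match st.2 with
   | [] => i = 0
   | t :: rest => t + 1 = i ∧ FBelow arr st.1 t rest)

lemma stepA_fwd (arr : List Int) (st : List Int × List Nat) (i : Nat)
    (hi : i < arr.length) (h : FSt arr st i) : FSt arr (stepA arr st i) (i + 1) := by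
  rcases h with ⟨hlen, hdone, hrest, hstack⟩
  have hHF : HF arr i st.1 st.2 := by
    cases hs : st.2 with
    | nil =>
      rw [hs] at hstack
      refine ⟨?_, ?_⟩
      · rw [hrest i le_rfl hi, hstack]; simp
      · intro m hm; omega
    | cons t rest =>
      rw [hs] at hstack
      rcases hstack with ⟨hti, hb⟩
      exact ⟨by omega, by rw [hrest i le_rfl hi]; omega, fun m h1 h2 => by omega, hb⟩
  have hpop := popA_fwd arr i hi st.2 st.1 hlen hHF
  rcases hpop with ⟨hlen', hHF', hne', hstop'⟩
  set p := popA arr (pg arr i) i st.1 st.2 with hp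
  refine ⟨hlen', ?_, ?_, ?_⟩
  · intro j hj
    rcases lt_or_eq_of_le (Nat.lt_succ_iff.mp hj) with h1 | h1
    · rw [show (stepA arr st i).1 = p.1 from rfl, hne' j (by omega), hdone j h1]
    · subst h1
      show pg p.1 j = Lv arr j
      cases hps : p.2 with
      | nil =>
        rw [hps] at hHF'
        rcases hHF' with ⟨hv, hall⟩
        rw [hv]
        unfold Lv
        rw [lwalk_all arr (pg arr j) j 1 hall]
        ring
      | cons t rest =>
        rw [hps] at hHF' hstop'
        rcases hHF' with ⟨hti, hv, hgap, _⟩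
        rw [hv]
        unfold Lv
        rw [lwalk_stop arr (pg arr j) j t 1 hti hgap (by omega)]
        ring
  · intro j h1 h2
    rw [show (stepA arr st i).1 = p.1 from rfl, hne' j (by omega), hrest j (by omega) h2]
  · show (match (i :: p.2 : List Nat) with
      | [] => i + 1 = 0
      | t :: rest => t + 1 = i + 1 ∧ FBelow arr p.1 t rest)
    refine ⟨rfl, ?_⟩
    cases hps : p.2 with
    | nil =>
      rw [hps] at hHF'
      exact hHF'
    | cons t rest =>
      rw [hps] at hHF' hstop'
      rcases hHF' with ⟨hti, hv, hgap, hb⟩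
      exact ⟨hti, hstop', hgap, hv, hb⟩

lemma fpass (arr : List Int) :
    ∀ (k i : Nat) (st : List Int × List Nat), i + k = arr.length → FSt arr st i →
      FSt arr ((List.range' i k).foldl (stepA arr) st) arr.length := by
  intro k
  induction k with
  | zero => intro i st hik h; simpa [List.range'] using (hik ▸ h)
  | succ m ih =>
    intro i st hik h
    rw [List.range'_succ, List.foldl_cons]
    exact ih (i + 1) (stepA arr st i) (by omega) (stepA_fwd arr st i (by omega) h)

-- ===== backward pass invariant =====

def BBelow (arr : List Int) (l : List Int) : Nat → List Nat → Prop
  | t, [] => pg l t = (arr.length : Int) - t ∧ ∀ m, t < m → m < arr.length → pg arr m < pg arr t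
  | t, u :: rest => t < u ∧ u < arr.length ∧ pg arr t ≤ pg arr u ∧
      (∀ m, t < m → m < u → pg arr m < pg arr t) ∧
      pg l t = (u : Int) - t ∧ BBelow arr l u rest

def HB (arr : List Int) (i : Nat) (l : List Int) : List Nat → Prop
  | [] => pg l i = (arr.length : Int) - i ∧ ∀ m, i < m → m < arr.length → pg arr m < pg arr i
  | t :: rest => i < t ∧ t < arr.length ∧ pg l i = (t : Int) - i ∧
      (∀ m, i < m → m < t → pg arr m < pg arr i) ∧ BBelow arr l t rest

lemma BBelow_congr (arr : List Int) :
    ∀ (s : List Nat) (t : Nat) (l l' : List Int),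
      (∀ j, t ≤ j → pg l' j = pg l j) → BBelow arr l t s → BBelow arr l' t s := by
  intro s
  induction s with
  | nil => intro t l l' hag h; exact ⟨(hag t le_rfl).trans h.1, h.2⟩
  | cons u rest ih =>
    intro t l l' hag h
    rcases h with ⟨htu, hun, harr, hgap, hl, hb⟩
    exact ⟨htu, hun, harr, hgap, (hag t le_rfl).trans hl,
      ih u l l' (fun j hj => hag j (by omega)) hb⟩

lemma popA_bwd (arr : List Int) (i : Nat) (hi : i < arr.length) :
    ∀ (s : List Nat) (l : List Int), l.length = arr.length → HB arr i l s →
      (popA arr (pg arr i) i l s).1.length = arr.length ∧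
      HB arr i (popA arr (pg arr i) i l s).1 (popA arr (pg arr i) i l s).2 ∧
      (∀ j, j ≠ i → pg (popA arr (pg arr i) i l s).1 j = pg l j) ∧
      (match (popA arr (pg arr i) i l s).2 with
       | [] => True
       | t :: _ => pg arr i ≤ pg arr t) := by
  intro s
  induction s with
  | nil =>
    intro l hlen h
    exact ⟨hlen, h, fun j _ => rfl, trivial⟩
  | cons t rest ih =>
    intro l hlen h
    rcases h with ⟨hit, htn, hli, hgap, hb⟩
    by_cases hc : pg arr t < pg arr i
    · simp only [popA, if_pos hc]
      set l₂ := l.set i (pg l i + pg l t) with hl₂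
      have hlen₂ : l₂.length = arr.length := by simp [hl₂, hlen]
      have hpg₂i : pg l₂ i = pg l i + pg l t := pg_set_self l i _ (by omega)
      have hpg₂ne : ∀ j, j ≠ i → pg l₂ j = pg l j := fun j hj => pg_set_ne l i j _ hj
      have h₂ : HB arr i l₂ rest := by
        cases rest with
        | nil =>
          rcases hb with ⟨hlt, habove⟩
          refine ⟨?_, ?_⟩
          · rw [hpg₂i, hli, hlt]; ring
          · intro m hm1 hm2
            rcases lt_trichotomy m t with h1 | h1 | h1
            · exact hgap m hm1 h1
            · subst h1; exact hc
            · exact lt_trans (habove m h1 hm2) hc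
        | cons u rest' =>
          rcases hb with ⟨htu, hun, harr, hgap', hlt, hb'⟩
          refine ⟨by omega, hun, ?_, ?_, ?_⟩
          · rw [hpg₂i, hli, hlt]; ring
          · intro m hm1 hm2
            rcases lt_trichotomy m t with h1 | h1 | h1
            · exact hgap m hm1 h1
            · subst h1; exact hc
            · exact lt_trans (hgap' m h1 hm2) hc
          · exact BBelow_congr arr rest' u l l₂
              (fun j hj => hpg₂ne j (by omega)) hb'
      have := ih l₂ hlen₂ h₂
      refine ⟨this.1, this.2.1, ?_, this.2.2.2⟩
      intro j hj
      rw [this.2.2.1 j hj, hpg₂ne j hj]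
    · simp only [popA, if_neg hc]
      refine ⟨hlen, ?_, fun j _ => trivial, by omega⟩
      exact ⟨hit, htn, hli, hgap, hb⟩

-- backward loop invariant: indices ≥ i are done, stack top is i
def BSt (arr : List Int) (st : List Int × List Nat) (i : Nat) : Prop :=
  st.1.length = arr.length ∧
  (∀ j, i ≤ j → j < arr.length → pg st.1 j = Rv arr j) ∧
  (∀ j, j < i → pg st.1 j = 1) ∧
  (match st.2 with
   | [] => i = arr.length
   | t :: rest => t = i ∧ t < arr.length ∧ BBelow arr st.1 t rest)

lemma stepA_bwd (arr : List Int) (st : List Int × List Nat) (i : Nat)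
    (hi : i < arr.length) (h : BSt arr st (i + 1)) : BSt arr (stepA arr st i) i := by
  rcases h with ⟨hlen, hdone, hrest, hstack⟩
  have hHB : HB arr i st.1 st.2 := by
    cases hs : st.2 with
    | nil =>
      rw [hs] at hstack
      refine ⟨?_, ?_⟩
      · rw [hrest i (by omega)]; omega
      · intro m hm1 hm2; omega
    | cons t rest =>
      rw [hs] at hstack
      rcases hstack with ⟨hti, htn, hb⟩
      refine ⟨by omega, htn, by rw [hrest i (by omega)]; omega, fun m h1 h2 => by omega, hb⟩
  have hpop := popA_bwd arr i hi st.2 st.1 hlen hHB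
  rcases hpop with ⟨hlen', hHB', hne', hstop'⟩
  set p := popA arr (pg arr i) i st.1 st.2 with hp
  refine ⟨hlen', ?_, ?_, ?_⟩
  · intro j h1 h2
    rcases lt_or_eq_of_le h1 with h3 | h3
    · rw [show (stepA arr st i).1 = p.1 from rfl, hne' j (by omega), hdone j (by omega) h2]
    · rw [← h3]
      show pg p.1 i = Rv arr i
      cases hps : p.2 with
      | nil =>
        rw [hps] at hHB'
        rcases hHB' with ⟨hv, hall⟩
        rw [hv]
        unfold Rv
        rw [rwalk_all arr arr.length (pg arr i) (i + 1) 1 (by omega)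
          (fun m hm1 hm2 => hall m (by omega) hm2)]
        push_cast; ring
      | cons t rest =>
        rw [hps] at hHB' hstop'
        rcases hHB' with ⟨hit, htn, hv, hgap, _⟩
        rw [hv]
        unfold Rv
        rw [rwalk_stop arr arr.length (pg arr i) (i + 1) t 1 (by omega) htn
          (fun m hm1 hm2 => hgap m (by omega) hm2) (by omega)]
        push_cast; ring
  · intro j hj
    rw [show (stepA arr st i).1 = p.1 from rfl, hne' j (by omega), hrest j (by omega)]
  · show (match (i :: p.2 : List Nat) with
      | [] => i = arr.length
      | t :: rest => t = i ∧ t < arr.length ∧ BBelow arr p.1 t rest)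
    refine ⟨rfl, hi, ?_⟩
    cases hps : p.2 with
    | nil =>
      rw [hps] at hHB'
      exact hHB'
    | cons t rest =>
      rw [hps] at hHB' hstop'
      rcases hHB' with ⟨hit, htn, hv, hgap, hb⟩
      exact ⟨hit, htn, hstop', hgap, hv, hb⟩

lemma bpass (arr : List Int) :
    ∀ (i : Nat) (st : List Int × List Nat), i ≤ arr.length → BSt arr st i →
      BSt arr (((List.range i).reverse).foldl (stepA arr) st) 0 := by
  intro i
  induction i with
  | zero => intro st _ h; simpa using h
  | succ m ih =>
    intro st hle h
    rw [List.range_succ, List.reverse_append, List.reverse_singleton, List.singleton_append,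
      List.foldl_cons]
    exact ih (stepA arr st m) (by omega) (stepA_bwd arr st m (by omega) h)

-- initial states
lemma FSt_init (arr : List Int) :
    FSt arr (List.replicate arr.length (1 : Int), ([] : List Nat)) 0 := by
  refine ⟨by simp, fun j hj => by omega, fun j _ hj => pg_replicate _ j hj, rfl⟩

lemma BSt_init (arr : List Int) :
    BSt arr (List.replicate arr.length (1 : Int), ([] : List Nat)) arr.length := by
  refine ⟨by simp, fun j h1 h2 => by omega, fun j hj => pg_replicate _ j hj, rfl⟩

-- Rv is at least 1
lemma Rv_ge_one (arr : List Int) (i : Nat) : 1 ≤ Rv arr i := rwalk_ge arr arr.length _ (i + 1) 1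

-- final max over the values: Python max() vs B's running maximum
lemma final_max (f : Nat → Int) (n : Nat) (hn : n ≠ 0) (h0 : 0 ≤ f 0) :
    (match PySem.List.max? ((List.range n).map f) (fun y => y) with
     | some v => v
     | none => 0)
    = (List.range n).foldl (fun b i => if f i > b then f i else b) 0 := by
  obtain ⟨m, rfl⟩ : ∃ m, n = m + 1 := ⟨n - 1, by omega⟩
  rw [List.range_succ_eq_map]
  simp only [List.map_cons, PySem.List.max?_id_cons]
  rw [List.foldl_cons]
  have hfun : (fun (b : Int) (i : Nat) => if f i > b then f i else b)
      = (fun (b : Int) (i : Nat) => max b (f i)) := by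
    funext b i
    simp only [max_def]
    split_ifs <;> omega
  have h00 : (if f 0 > 0 then f 0 else 0) = f 0 := by
    split_ifs <;> omega
  rw [h00, hfun, List.foldl_map]

-- ===== VERDICT (by name: the statement is the Claim_ definition above) =====
theorem maxPeople_spec : Claim_equal_maxPeople := by
  unfold Claim_equal_maxPeople
  intro arr _ hpre
  unfold Spec_maxPeople
  have hn : arr.length ≠ 0 := by
    intro h
    exact hpre (List.eq_nil_of_length_eq_zero h)
  have hfw := fpass arr arr.length 0 (List.replicate arr.length (1 : Int), ([] : List Nat))
    (by omega) (FSt_init arr)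
  have hbw := bpass arr arr.length (List.replicate arr.length (1 : Int), ([] : List Nat))
    le_rfl (BSt_init arr)
  rw [← List.range_eq_range'] at hfw
  unfold maxPeople maxPeople_alt
  simp only []
  set fw := (List.range arr.length).foldl (stepA arr)
    (List.replicate arr.length (1 : Int), ([] : List Nat)) with hfwd
  set bw := ((List.range arr.length).reverse).foldl (stepA arr)
    (List.replicate arr.length (1 : Int), ([] : List Nat)) with hbwd
  have hL : ∀ j, j < arr.length → pg fw.1 j = Lv arr j := fun j hj => hfw.2.1 j hj
  have hR : ∀ j, j < arr.length → pg bw.1 j = Rv arr j := fun j hj => hbw.2.1 j (by omega) hj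
  have hmap : (List.range arr.length).map (fun i => pg fw.1 i + pg bw.1 i - 1)
      = (List.range arr.length).map (fun i => Lv arr i + Rv arr i - 1) := by
    apply List.map_congr_left
    intro i hi
    rw [hL i (List.mem_range.mp hi), hR i (List.mem_range.mp hi)]
  rw [hmap]
  have h0 : (0 : Int) ≤ Lv arr 0 + Rv arr 0 - 1 := by
    have h1 : Lv arr 0 = 1 := rfl
    have h2 := Rv_ge_one arr 0
    omega
  have := final_max (fun i => Lv arr i + Rv arr i - 1) arr.length hn h0
  rw [this]
  rfl
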